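-- pv_equiv track=rewrite | github.com/alexiswl/Unicycler | lib/bridge.py | find_contig_bridges
-- ===== SOURCE A (Python) =====
-- def find_contig_bridges(segment_num, path, single_copy_numbers):
--     '''
--     This function returns a list of lists: every part of the path which starts on the segment_num
--     and ends on any of the single_copy_numbers.
--     '''
--     bridge_paths = []
--     indices = [i for i, x in enumerate(path) if abs(x) == segment_num]
--     for index in indices:
--         bridge_path = [path[index]]
--         for i in range(index+1, len(path)):
--             bridge_path.append(path[i])
--             if path[i] in single_copy_numbers or -path[i] in single_copy_numbers:
--                 break
--         else:
--             bridge_path = []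
--         if bridge_path:
--             bridge_paths.append(bridge_path)
--     return bridge_paths
-- ===== SOURCE B (Python) =====
-- def find_contig_bridges(segment_num, path, single_copy_numbers):
--     '''
--     Single left-to-right pass keeping the list of currently open bridges:
--     each element extends every open bridge; a single-copy element (looked up in
--     a set built once) flushes all open bridges to the result; an element whose
--     abs equals segment_num opens a new bridge. Bridges still open at the end
--     are discarded.
--     '''
--     scs = set(single_copy_numbers)
--     result = []
--     active = []
--     for e in path:
--         for b in active:
--             b.append(e)
--         if e in scs or -e in scs:
--             result.extend(active)
--             active = []
--         if abs(e) == segment_num: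
--             active.append([e])
--     return result
-- ===== Notes on version B (the rewrite author's own statement) =====
-- stated objective: alternative
-- what changed: Replaces A's two-phase 'collect all start indices, then rescan forward from each' with a single left-to-right pass maintaining the list of currently open bridges, looking closers up in a set built once.
import Mathlib
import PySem

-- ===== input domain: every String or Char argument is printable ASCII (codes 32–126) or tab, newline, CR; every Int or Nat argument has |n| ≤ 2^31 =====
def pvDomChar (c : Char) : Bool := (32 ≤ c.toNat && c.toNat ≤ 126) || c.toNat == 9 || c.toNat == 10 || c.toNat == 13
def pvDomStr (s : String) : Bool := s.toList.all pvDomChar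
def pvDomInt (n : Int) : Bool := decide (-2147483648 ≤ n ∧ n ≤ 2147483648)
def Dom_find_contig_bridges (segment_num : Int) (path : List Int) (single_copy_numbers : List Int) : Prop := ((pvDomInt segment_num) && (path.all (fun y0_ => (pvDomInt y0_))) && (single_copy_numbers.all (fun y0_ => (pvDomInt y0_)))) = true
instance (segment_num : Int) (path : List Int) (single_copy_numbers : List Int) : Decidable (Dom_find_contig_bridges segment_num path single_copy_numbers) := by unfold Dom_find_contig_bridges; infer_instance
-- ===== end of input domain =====

-- B replaces A's "collect all start indices, then rescan forward from each" with one
-- left-to-right pass maintaining the list of currently open bridges (objective: alternative).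

-- ===== PORT A =====
-- inner `for i in range(index+1, len(path))` loop of A, with its for-else:
-- recursion over the suffix path[index+1:]; returns [] exactly when the loop
-- finishes without break (the else branch resets bridge_path to []).
def aInner (scn : List Int) (bridge : List Int) : List Int → List Int
  | [] => []
  | x :: rest =>
    let bridge' := bridge ++ [x]
    if scn.contains x || scn.contains (-x) then bridge' else aInner scn bridge' rest

def find_contig_bridges (segment_num : Int) (path : List Int) (single_copy_numbers : List Int) : List (List Int) :=
  let indices := ((PySem.List.enumerate path).filter (fun p => |p.2| == segment_num)).map (·.1)
  indices.foldl (fun bridge_paths index =>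
    -- bridge_path = [path[index]] extended by the inner loop over range(index+1, len(path))
    let bridge_path := aInner single_copy_numbers [PySem.List.pyGetD path index 0] (path.drop (index + 1).toNat)
    if bridge_path.isEmpty then bridge_paths else bridge_paths ++ [bridge_path]) []

-- ===== PORT B =====
-- single pass: extend every open bridge, flush on a single-copy element (set lookup), open on a start element
def bLoop (seg : Int) (scs : PySem.Set Int) : List Int → List (List Int) → List (List Int) → List (List Int)
  | [], _, result => result
  | e :: rest, active, result =>
    let active1 := active.map (fun b => b ++ [e])
    let p := if scs.contains e || scs.contains (-e) then (result ++ active1, ([] : List (List Int))) else (result, active1)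
    let active2 := if |e| = seg then p.2 ++ [[e]] else p.2
    bLoop seg scs rest active2 p.1

def find_contig_bridges_alt (segment_num : Int) (path : List Int) (single_copy_numbers : List Int) : List (List Int) :=
  let scs := PySem.Set.ofList single_copy_numbers
  bLoop segment_num scs path [] []

-- ===== PRECONDITION & SPEC =====
def Spec_find_contig_bridges (segment_num : Int) (path : List Int) (single_copy_numbers : List Int) (out : List (List Int)) : Prop := out = find_contig_bridges_alt segment_num path single_copy_numbers
instance (segment_num : Int) (path : List Int) (single_copy_numbers : List Int) (out : List (List Int)) : Decidable (Spec_find_contig_bridges segment_num path single_copy_numbers out) := by unfold Spec_find_contig_bridges; infer_instance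

-- ===== CLAIM (what is proved, stated in full; the proofs are below) =====
def Claim_equal_find_contig_bridges : Prop := ∀ (segment_num : Int) (path : List Int) (single_copy_numbers : List Int), Dom_find_contig_bridges segment_num path single_copy_numbers → Spec_find_contig_bridges segment_num path single_copy_numbers (find_contig_bridges segment_num path single_copy_numbers)

-- ===== LEMMAS AND PROOFS =====

-- ext scn l : the extension of an open bridge by the elements of l ([] iff l never closes it)
def pvExt (scn : List Int) (l : List Int) : List Int := aInner scn [] l

-- common reference value: the bridges starting and closing inside l, in start order
def pvSpec (seg : Int) (scn : List Int) : List Int → List (List Int)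
  | [] => []
  | e :: r =>
    (if |e| = seg then (match pvExt scn r with | [] => [] | t => [e :: t]) else []) ++ pvSpec seg scn r

theorem aInner_eq_ext (scn : List Int) (l : List Int) : ∀ b : List Int,
    aInner scn b l = match pvExt scn l with | [] => [] | t => b ++ t := by
  induction l with
  | nil => intro b; rfl
  | cons x rest ih =>
    intro b
    cases h : (scn.contains x || scn.contains (-x)) <;>
      simp only [pvExt, aInner, h, Bool.false_eq_true, if_false, if_true, List.nil_append]
    rw [ih (b ++ [x]), ih [x]]
    cases hr : pvExt scn rest <;> simp

theorem A_loop (seg : Int) (scn : List Int) :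
    ∀ (l pre : List Int) (acc : List (List Int)),
    ((((PySem.List.enumerate l (pre.length : Int)).filter (fun p => |p.2| == seg)).map (·.1)).foldl
      (fun bridge_paths index =>
        let bridge_path := aInner scn [PySem.List.pyGetD (pre ++ l) index 0] ((pre ++ l).drop (index + 1).toNat)
        if bridge_path.isEmpty then bridge_paths else bridge_paths ++ [bridge_path]) acc)
    = acc ++ pvSpec seg scn l := by
  intro l
  induction l with
  | nil => intro pre acc; simp [PySem.List.enumerate, pvSpec]
  | cons e r ih =>
    intro pre acc
    rw [PySem.List.enumerate_cons]
    have hlen : ((pre.length : Int)) + 1 = ((pre ++ [e]).length : Int) := by simp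
    have hget : PySem.List.pyGetD (pre ++ e :: r) (pre.length : Int) 0 = e := by
      rw [PySem.List.pyGetD_natCast]
      simp [List.getD]
    have hdrop : (pre ++ e :: r).drop ((pre.length : Int) + 1).toNat = r := by
      have : ((pre.length : Int) + 1).toNat = pre.length + 1 := by omega
      rw [this]
      rw [show pre.length + 1 = (pre ++ [e]).length by simp,
          show pre ++ e :: r = (pre ++ [e]) ++ r by simp]
      exact List.drop_left
    have hassoc : pre ++ e :: r = (pre ++ [e]) ++ r := by simp
    by_cases h : |e| = seg
    · rw [List.filter_cons_of_pos (by simpa using h)]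
      simp only [List.map_cons, List.foldl_cons]
      rw [hget, hdrop, aInner_eq_ext]
      rw [hlen, hassoc, ih (pre ++ [e])]
      simp only [pvSpec, if_pos h]
      cases hr : pvExt scn r <;> simp
    · rw [List.filter_cons_of_neg (by simpa using h)]
      rw [hlen, hassoc, ih (pre ++ [e])]
      simp [pvSpec, h]

theorem bLoop_spec (seg : Int) (scn : List Int) (scs : PySem.Set Int)
    (hmem : ∀ x : Int, scs.contains x = scn.contains x) :
    ∀ (rest : List Int) (active result : List (List Int)),
    bLoop seg scs rest active result
      = result ++ (match pvExt scn rest with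
                   | [] => []
                   | t => active.map (· ++ t)) ++ pvSpec seg scn rest := by
  intro rest
  induction rest with
  | nil => intro active result; simp [bLoop, pvExt, aInner, pvSpec]
  | cons e r ih =>
    intro active result
    simp only [bLoop, hmem]
    by_cases hc : (scn.contains e || scn.contains (-e)) = true
    · have hext : pvExt scn (e :: r) = [e] := by
        simp only [pvExt, aInner, hc, List.nil_append]; rfl
      simp only [hc, if_pos]
      by_cases hs : |e| = seg
      · rw [if_pos hs, ih]
        simp only [hext, pvSpec, if_pos hs]
        cases hr : pvExt scn r <;> simp
      · rw [if_neg hs, ih]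
        simp only [hext, pvSpec, if_neg hs]
        cases hr : pvExt scn r <;> simp
    · have hext : pvExt scn (e :: r) = match pvExt scn r with | [] => [] | t => e :: t := by
        have h1 : pvExt scn (e :: r) = aInner scn [e] r := by
          simp only [pvExt, aInner, hc, Bool.false_eq_true, if_false, List.nil_append]
        rw [h1, aInner_eq_ext scn r [e]]
        cases pvExt scn r <;> simp
      simp only [hc, Bool.false_eq_true, if_false]
      by_cases hs : |e| = seg
      · rw [if_pos hs, ih]
        simp only [hext, pvSpec, if_pos hs]
        cases hr : pvExt scn r <;> simp [List.map_map, Function.comp_def]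
      · rw [if_neg hs, ih]
        simp only [hext, pvSpec, if_neg hs]
        cases hr : pvExt scn r <;> simp [List.map_map, Function.comp_def]

-- ===== VERDICT (by name: the statement is the Claim_ definition above) =====
theorem find_contig_bridges_spec : Claim_equal_find_contig_bridges := by
  intro seg path scn _
  have hA := A_loop seg scn path [] []
  simp only [List.nil_append, List.length_nil, Nat.cast_zero] at hA
  simp only [Spec_find_contig_bridges, find_contig_bridges, find_contig_bridges_alt]
  have hmem : ∀ x : Int, (PySem.Set.ofList scn).contains x = scn.contains x := by
    intro x
    simp [PySem.Set.mem_ofList]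
  rw [hA, bLoop_spec seg scn _ hmem]
  cases hr : pvExt scn path <;> simp
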